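-- pv_equiv track=rewrite | github.com/cfinn68916/Password-Manager | main.py | PasswordTransform
-- ===== SOURCE A (Python) =====
-- def PasswordTransform(passwd, rules=None):
--     if rules is None:
--         rules = []
--     passwd = passwd.replace(passwd[0], '')  # Delete all instances of the first character
--     new = ''
--     for i, ii in enumerate(passwd):  # get the next pair of digits
--         if i == len(passwd) - 1:
--             break
--         if i % 2 == 0:
--             if chr(int(ii + passwd[i + 1], 16) % 91 + 33) not in rules:
--                 new += chr(int(ii + passwd[i + 1], 16) % 91 + 33)
--             else:
--                 new += str(ii + passwd[i + 1])
--     return new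
-- ===== SOURCE B (Python) =====
-- def PasswordTransform(passwd, rules=None):
--     if rules is None:
--         rules = []
--     passwd = passwd.replace(passwd[0], '')  # delete all instances of the first character
--     pieces = []
--     for a, b in zip(passwd[0::2], passwd[1::2]):  # the consecutive (even, odd) pairs
--         c = chr(int(a + b, 16) % 91 + 33)
--         pieces.append(c if c not in rules else a + b)
--     return ''.join(pieces)
-- ===== Notes on version B (the rewrite author's own statement) =====
-- stated objective: simpler
-- what changed: Replaces the indexed enumerate loop with its break and parity test by a pre-built pair stream zip(passwd[0::2], passwd[1::2]) mapped flatly to pieces joined at the end.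
import Mathlib
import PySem

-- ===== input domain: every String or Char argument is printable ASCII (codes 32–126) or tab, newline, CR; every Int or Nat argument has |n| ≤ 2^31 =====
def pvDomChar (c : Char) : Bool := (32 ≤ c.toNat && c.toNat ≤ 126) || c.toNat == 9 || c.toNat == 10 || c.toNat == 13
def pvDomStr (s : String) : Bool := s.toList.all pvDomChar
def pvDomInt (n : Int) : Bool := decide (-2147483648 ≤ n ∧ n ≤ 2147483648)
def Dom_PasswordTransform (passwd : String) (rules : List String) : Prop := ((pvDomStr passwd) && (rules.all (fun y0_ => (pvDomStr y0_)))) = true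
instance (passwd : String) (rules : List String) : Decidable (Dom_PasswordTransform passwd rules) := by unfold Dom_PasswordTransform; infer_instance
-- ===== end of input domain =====

-- B replaces A's indexed enumerate loop (break + parity test) by a zip of the two
-- stride-2 slices mapped to pieces and joined; same return value, no speed claim.

-- ===== PORT A =====
-- int(a+b, 16) on the two-character string [a, b]  (exact: PySem.Int.ofCharsBase?)
-- A's for-loop over enumerate(passwd), carrying the accumulator `new`.
def pvLoopA (t : List Char) (rules : List String) : List (Int × Char) → List Char → List Char
  | [], new => new
  | (i, ii) :: rest, new =>
    if i = (t.length : Int) - 1 then new                 -- break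
    else if PySem.Int.mod i 2 = 0 then
      match PySem.List.pyGet? t (i + 1) with
      | none => new                                      -- unreachable: i < len(t) - 1
      | some nxt =>
        match PySem.Int.ofCharsBase? [ii, nxt] 16 with
        | none => new                                    -- ValueError: excluded by Pre_
        | some n =>
          let c := Char.ofNat (PySem.Int.mod n 91 + 33).toNat   -- chr(_ % 91 + 33)
          if ¬ (String.ofList [c] ∈ rules) then pvLoopA t rules rest (new ++ [c])
          else pvLoopA t rules rest (new ++ [ii, nxt])
    else pvLoopA t rules rest new

def PasswordTransform (passwd : String) (rules : List String) : String :=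
  match PySem.Str.pyGet? passwd 0 with
  | none => ""                                           -- IndexError on "": excluded by Pre_
  | some c0 =>
    let t := PySem.Chars.replace passwd.toList [c0] []   -- passwd.replace(passwd[0], '')
    String.ofList (pvLoopA t rules (PySem.List.enumerate t) [])

-- ===== PORT B =====
-- hand port of the stride-2 slice s[0::2] (exact for step 2, start 0, on the given list)
def pvStride2 {α : Type} : List α → List α
  | [] => []
  | a :: rest => a :: pvStride2 (rest.drop 1)
termination_by l => l.length
decreasing_by simp

def PasswordTransform_alt (passwd : String) (rules : List String) : String :=
  match PySem.Str.pyGet? passwd 0 with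
  | none => ""                                           -- IndexError on "": excluded by Pre_
  | some c0 =>
    let t := PySem.Chars.replace passwd.toList [c0] []   -- passwd.replace(passwd[0], '')
    let pairs := (pvStride2 t).zip (pvStride2 (t.drop 1))   -- zip(passwd[0::2], passwd[1::2])
    String.ofList (PySem.Chars.join [] (pairs.map (fun p =>
      match PySem.Int.ofCharsBase? [p.1, p.2] 16 with
      | none => []                                       -- ValueError: excluded by Pre_
      | some n =>
        let c := Char.ofNat (PySem.Int.mod n 91 + 33).toNat
        if ¬ (String.ofList [c] ∈ rules) then [c] else [p.1, p.2])))

-- ===== PRECONDITION & SPEC =====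
-- the consecutive disjoint pairs of a list (an unpaired trailing element is dropped)
def pvPairs {α : Type} : List α → List (α × α)
  | a :: b :: rest => (a, b) :: pvPairs rest
  | _ => []

-- passwd with every occurrence of its first character removed
def pvAfterStrip (passwd : String) : List Char :=
  match passwd.toList with
  | [] => []
  | c :: _ => PySem.Chars.replace passwd.toList [c] []

-- Pre_ = exactly where A returns: nonempty passwd (else IndexError) and every processed
-- two-character pair parses as int(_, 16) (else ValueError).
def Pre_PasswordTransform (passwd : String) (rules : List String) : Prop :=
  passwd.toList ≠ [] ∧
  ∀ p ∈ pvPairs (pvAfterStrip passwd), (PySem.Int.ofCharsBase? [p.1, p.2] 16).isSome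
instance (passwd : String) (rules : List String) : Decidable (Pre_PasswordTransform passwd rules) := by
  unfold Pre_PasswordTransform; infer_instance

def pvWitness_PasswordTransform : String × List String := ("zab12", ["+"])

def Spec_PasswordTransform (passwd : String) (rules : List String) (out : String) : Prop := out = PasswordTransform_alt passwd rules
instance (passwd : String) (rules : List String) (out : String) : Decidable (Spec_PasswordTransform passwd rules out) := by unfold Spec_PasswordTransform; infer_instance

-- ===== CLAIM (what is proved, stated in full; the proofs are below) =====
def Claim_equal_PasswordTransform : Prop := ∀ (passwd : String) (rules : List String), Dom_PasswordTransform passwd rules → Pre_PasswordTransform passwd rules → Spec_PasswordTransform passwd rules (PasswordTransform passwd rules)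

-- ===== LEMMAS AND PROOFS =====
-- the piece contributed by one pair (the common value of A's even-index body and B's map body)
def pvPiece (rules : List String) (p : Char × Char) : List Char :=
  match PySem.Int.ofCharsBase? [p.1, p.2] 16 with
  | none => []
  | some n =>
    let c := Char.ofNat (PySem.Int.mod n 91 + 33).toNat
    if ¬ (String.ofList [c] ∈ rules) then [c] else [p.1, p.2]

theorem pvZip_stride {α : Type} : ∀ (t : List α), (pvStride2 t).zip (pvStride2 (t.drop 1)) = pvPairs t := by
  intro t
  induction t using pvPairs.induct with
  | case1 a b rest ih =>
    simp [pvStride2, pvPairs, List.tail]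
    simpa using ih
  | case2 t h1 =>
    cases t with
    | nil => simp [pvStride2, pvPairs]
    | cons a rest =>
      cases rest with
      | nil => simp [pvStride2, pvPairs]
      | cons b r => exact absurd rfl (fun h => h1 a b r h)

theorem pvJoin_flatten : ∀ (l : List (List Char)), PySem.Chars.join [] l = l.flatten := by
  intro l
  induction l with
  | nil => simp [PySem.Chars.join_nil]
  | cons x rest ih =>
    cases rest with
    | nil => simp [PySem.Chars.join_singleton]
    | cons y zs => rw [PySem.Chars.join_cons_cons]; simp_all

theorem pvLoopA_spec (t : List Char) (rules : List String) :
    ∀ (u : List Char) (k : Nat) (acc : List Char),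
      t.drop k = u → k % 2 = 0 →
      (∀ p ∈ pvPairs u, (PySem.Int.ofCharsBase? [p.1, p.2] 16).isSome) →
      pvLoopA t rules (PySem.List.enumerate u (k : Int)) acc
        = acc ++ (pvPairs u).flatMap (pvPiece rules) := by
  intro u
  induction u using pvPairs.induct with
  | case1 a b u' ih =>
    intro k acc hdrop hk hhex
    have hkle : k ≤ t.length := by
      by_contra h
      have : t.drop k = [] := List.drop_eq_nil_of_le (by omega)
      simp [this] at hdrop
    have hlen : t.length = k + 2 + u'.length := by
      have := congrArg List.length hdrop
      simp [List.length_drop] at this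
      omega
    have h1 : ¬ ((k : Int) = (t.length : Int) - 1) := by push_cast [hlen]; omega
    have h2 : PySem.Int.mod (k : Int) 2 = 0 := by
      rw [show ((2:Int)) = ((2:Nat):Int) from rfl, PySem.Int.mod_natCast, hk]
      rfl
    have hteq : t = t.take k ++ (a :: b :: u') := by rw [← hdrop, List.take_append_drop]
    have htk : (t.take k).length = k := by simp [List.length_take]; omega
    have h3 : PySem.List.pyGet? t ((k : Int) + 1) = some b := by
      conv_lhs => rw [hteq]
      rw [show ((k : Int) + 1) = (((t.take k).length : Int) + ((1:Nat):Int)) from by rw [htk]; push_cast; ring]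
      rw [PySem.List.pyGet?_append_right]
      rfl
    obtain ⟨n, hn⟩ := Option.isSome_iff_exists.mp (hhex (a, b) (by simp [pvPairs]))
    have hpair : pvPairs (a :: b :: u') = (a, b) :: pvPairs u' := by simp [pvPairs]
    rw [PySem.List.enumerate_cons, PySem.List.enumerate_cons]
    rw [pvLoopA]
    simp only [h1, h2, h3, hn, ite_false]
    have hstep2 : ∀ acc' : List Char,
        pvLoopA t rules (((k : Int) + 1, b) :: PySem.List.enumerate u' ((k : Int) + 1 + 1)) acc'
          = acc' ++ List.flatMap (pvPiece rules) (pvPairs u') := by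
      intro acc'
      cases u' with
      | nil =>
        rw [pvLoopA]
        have hend : ((k : Int) + 1) = (t.length : Int) - 1 := by push_cast [hlen, List.length_nil]; omega
        simp [hend, pvPairs]
      | cons x xs =>
        have hne : ¬ ((k : Int) + 1 = (t.length : Int) - 1) := by push_cast [hlen, List.length_cons]; omega
        have hodd : ¬ (PySem.Int.mod ((k : Int) + 1) 2 = 0) := by
          rw [show ((k : Int) + 1) = (((k + 1 : Nat) : Int)) from by push_cast; ring,
             show ((2 : Int)) = ((2 : Nat) : Int) from rfl, PySem.Int.mod_natCast]
          simp
          omega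
        rw [pvLoopA]
        simp only [hne, hodd, ite_false]
        rw [show ((k : Int) + 1 + 1) = (((k + 2 : Nat) : Int)) from by push_cast; ring]
        apply ih (k + 2) acc'
        · have h2d := congrArg (List.drop 2) hdrop
          rw [List.drop_drop] at h2d
          simpa [Nat.add_comm] using h2d
        · omega
        · intro p hp
          exact hhex p (by rw [hpair]; exact List.mem_cons_of_mem _ hp)
    simp only [hstep2, hpair, List.flatMap_cons, pvPiece, hn]
    split_ifs <;> simp
  | case2 u h1 =>
    intro k acc hdrop hk hhex
    cases u with
    | nil => simp [PySem.List.enumerate_nil, pvLoopA, pvPairs]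
    | cons a rest =>
      cases rest with
      | nil =>
        have hkle : k ≤ t.length := by
          by_contra h
          have : t.drop k = [] := List.drop_eq_nil_of_le (by omega)
          simp [this] at hdrop
        have hlen : t.length = k + 1 := by
          have := congrArg List.length hdrop
          simp [List.length_drop] at this
          omega
        rw [PySem.List.enumerate_cons, PySem.List.enumerate_nil]
        rw [pvLoopA]
        simp [pvPairs, hlen]
      | cons b r => exact absurd rfl (fun h => h1 a b r h)

-- ===== VERDICT (by name: the statement is the Claim_ definition above) =====
theorem PasswordTransform_spec : Claim_equal_PasswordTransform := by
  intro passwd rules _hdom hpre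
  obtain ⟨hne, hhex⟩ := hpre
  unfold Spec_PasswordTransform
  cases h : passwd.toList with
  | nil => exact absurd h hne
  | cons c cs =>
    have hget : PySem.Str.pyGet? passwd 0 = some c := by
      simp [PySem.Str.pyGet?, h]
    have hstrip : pvAfterStrip passwd = PySem.Chars.replace passwd.toList [c] [] := by
      simp only [pvAfterStrip, h]
    rw [hstrip] at hhex
    unfold PasswordTransform PasswordTransform_alt
    rw [hget]
    have hloop := pvLoopA_spec (PySem.Chars.replace passwd.toList [c] []) rules
      (PySem.Chars.replace passwd.toList [c] []) 0 []
      List.drop_zero rfl hhex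
    simp only [Nat.cast_zero] at hloop
    simp only [hloop, pvZip_stride, pvJoin_flatten, List.nil_append]
    rw [← List.flatMap_def]
    rfl
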